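-- pv_equiv track=rewrite | github.com/anurag2050doit/DSA | Algo/Smallest sequence with given Primes.py | solve
-- ===== SOURCE A (Python) =====
-- import heapq
--
-- def solve(A, B, C, D):
--     h, res = [], []
--     for elem in [A, B, C]:
--         if elem not in h:
--             heapq.heappush(h, elem)
--
--     while len(res) < D:
--         min_ele = heapq.heappop(h)
--         res.append(min_ele)
--         for elem in [min_ele * A, min_ele * B, min_ele * C]:
--             if elem not in h:
--                 heapq.heappush(h, elem)
--
--     return res
-- ===== SOURCE B (Python) =====
-- def solve(A, B, C, D):
--     frontier = {A, B, C}
--     res = []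
--     for _ in range(max(D, 0)):
--         m = min(frontier)
--         frontier.discard(m)
--         res.append(m)
--         frontier.update((m * A, m * B, m * C))
--     return res
-- ===== Notes on version B (the rewrite author's own statement) =====
-- stated objective: simpler
-- what changed: Replaces the heap plus linear 'not in heap' dedup scans by a plain set of pending candidates from which the minimum is extracted each round: no heapq, no membership guards, and the while-loop becomes a for-loop over range(D).
import Mathlib
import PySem

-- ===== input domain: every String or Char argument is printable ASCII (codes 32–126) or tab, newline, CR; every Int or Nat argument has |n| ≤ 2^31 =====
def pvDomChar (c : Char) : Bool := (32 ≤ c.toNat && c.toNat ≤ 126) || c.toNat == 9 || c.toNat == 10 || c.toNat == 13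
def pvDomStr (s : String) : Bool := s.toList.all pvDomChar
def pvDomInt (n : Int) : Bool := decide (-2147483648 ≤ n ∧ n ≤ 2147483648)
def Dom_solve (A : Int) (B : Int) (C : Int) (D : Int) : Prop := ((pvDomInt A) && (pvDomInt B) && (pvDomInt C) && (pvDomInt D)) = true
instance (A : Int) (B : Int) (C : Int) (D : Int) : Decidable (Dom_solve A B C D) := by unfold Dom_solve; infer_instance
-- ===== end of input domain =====

-- B replaces A's heap (with its linear dedup scans) by a plain set with min-extraction: simpler, same values.

-- ===== PORT A =====
-- heapq is ported as a sorted-list priority queue: heappush inserts in order, heappop takes the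
-- head — exact for everything A observes (heappop returns and removes the smallest element of the
-- heap; 'elem not in h' depends only on the heap's contents, not its layout).
def heappushA (h : List Int) (e : Int) : List Int := List.orderedInsert (· ≤ ·) e h

-- 'if elem not in h: heapq.heappush(h, elem)' — the guarded push A performs in both of its for-loops
def pushIfAbsentA (h : List Int) (e : Int) : List Int := if e ∈ h then h else heappushA h e

-- the 'while len(res) < D' loop: res grows by one per iteration from [], so it runs max(D,0) = D.toNat times
def solveGoA (A : Int) (B : Int) (C : Int) (D : Nat) (h : List Int) (res : List Int) : List Int :=
  match D with
  | 0 => res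
  | Nat.succ n =>
    match h with
    | [] => res  -- heapq.heappop on an empty heap: IndexError (never reached from solve's initial state)
    | min_ele :: rest =>
      solveGoA A B C n ([min_ele * A, min_ele * B, min_ele * C].foldl pushIfAbsentA rest)
        (res ++ [min_ele])

def solve (A : Int) (B : Int) (C : Int) (D : Int) : List Int :=
  solveGoA A B C D.toNat ([A, B, C].foldl pushIfAbsentA []) []

-- ===== PORT B =====
def solveGoB (A : Int) (B : Int) (C : Int) (D : Nat) (frontier : PySem.Set Int) (res : List Int) : List Int :=
  match D with
  | 0 => res
  | Nat.succ n =>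
    match PySem.List.min? frontier (fun x => x) with
    | none => res  -- min() of an empty set: ValueError (never reached from solve_alt's initial state)
    | some m =>
      solveGoB A B C n
        (PySem.Set.update (PySem.Set.discard frontier m) [m * A, m * B, m * C])
        (res ++ [m])

def solve_alt (A : Int) (B : Int) (C : Int) (D : Int) : List Int :=
  solveGoB A B C D.toNat (PySem.Set.ofList [A, B, C]) []

-- ===== PRECONDITION & SPEC =====
def Spec_solve (A : Int) (B : Int) (C : Int) (D : Int) (out : List Int) : Prop := out = solve_alt A B C D
instance (A : Int) (B : Int) (C : Int) (D : Int) (out : List Int) : Decidable (Spec_solve A B C D out) := by unfold Spec_solve; infer_instance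

-- ===== CLAIM (what is proved, stated in full; the proofs are below) =====
def Claim_equal_solve : Prop := ∀ (A : Int) (B : Int) (C : Int) (D : Int), Dom_solve A B C D → Spec_solve A B C D (solve A B C D)

-- ===== LEMMAS AND PROOFS =====

-- Invariant tying A's heap h to B's frontier f: h is strictly increasing, f is duplicate-free,
-- and they hold the same elements.
def InvHF (h f : List Int) : Prop :=
  h.Pairwise (· < ·) ∧ f.Nodup ∧ ∀ x : Int, x ∈ f ↔ x ∈ h

lemma pairwise_lt_orderedInsert (h : List Int) (p : Int)
    (hp : h.Pairwise (· < ·)) (hnp : p ∉ h) :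
    (List.orderedInsert (· ≤ ·) p h).Pairwise (· < ·) := by
  induction h with
  | nil => simp
  | cons b l ih =>
    have hb : b < p ∨ p < b := by
      rcases lt_trichotomy p b with h1 | h1 | h1
      · exact Or.inr h1
      · exact absurd (h1 ▸ List.mem_cons_self) hnp
      · exact Or.inl h1
    simp only [List.orderedInsert]
    by_cases hle : p ≤ b
    · simp only [if_pos hle]
      have hpb : p < b := lt_of_le_of_ne hle (fun he => hnp (he ▸ List.mem_cons_self))
      refine List.Pairwise.cons ?_ hp
      intro y hy
      rcases List.mem_cons.mp hy with rfl | hy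
      · exact hpb
      · exact lt_trans hpb ((List.pairwise_cons.mp hp).1 y hy)
    · simp only [if_neg hle]
      refine List.Pairwise.cons ?_ (ih (List.Pairwise.of_cons hp) (fun hm => hnp (List.mem_cons_of_mem _ hm)))
      intro y hy
      rcases (List.mem_orderedInsert _).mp hy with rfl | hy
      · rcases hb with hb | hb
        · exact hb
        · exact absurd (le_of_lt hb) hle
      · exact (List.pairwise_cons.mp hp).1 y hy

lemma step_inv (h f : List Int) (p : Int) (hinv : InvHF h f) :
    InvHF (pushIfAbsentA h p) (PySem.Set.add f p) := by
  obtain ⟨hp, hn, hm⟩ := hinv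
  have hmem : (PySem.Set.contains f p = true) ↔ p ∈ h := by
    rw [PySem.Set.contains_iff]; exact hm p
  unfold pushIfAbsentA heappushA PySem.Set.add
  by_cases hph : p ∈ h
  · rw [if_pos hph, if_pos (hmem.mpr hph)]
    exact ⟨hp, hn, hm⟩
  · rw [if_neg hph, if_neg (fun hc => hph (hmem.mp hc))]
    refine ⟨pairwise_lt_orderedInsert h p hp hph, ?_, ?_⟩
    · have hpf : p ∉ f := fun hc => hph ((hm p).mp hc)
      exact List.Nodup.append hn (List.nodup_singleton p) (by simpa using hpf)
    · intro x
      rw [List.mem_append, List.mem_orderedInsert]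
      simp only [List.mem_singleton]
      constructor
      · rintro (hx | rfl)
        · exact Or.inr ((hm x).mp hx)
        · exact Or.inl rfl
      · rintro (rfl | hx)
        · exact Or.inr rfl
        · exact Or.inl ((hm x).mpr hx)

lemma fold_inv (l : List Int) : ∀ h f, InvHF h f →
    InvHF (l.foldl pushIfAbsentA h) (l.foldl PySem.Set.add f) := by
  induction l with
  | nil => intro h f hinv; exact hinv
  | cons p l ih =>
    intro h f hinv
    exact ih _ _ (step_inv h f p hinv)

lemma min_of_inv (m : Int) (rest f : List Int) (hinv : InvHF (m :: rest) f) :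
    PySem.List.min? f (fun x => x) = some m := by
  obtain ⟨hp, hn, hm⟩ := hinv
  have hmf : m ∈ f := (hm m).mpr List.mem_cons_self
  cases hmin : PySem.List.min? f (fun x => x) with
  | none =>
    rw [(PySem.List.min?_eq_none_iff f _).mp hmin] at hmf
    simp at hmf
  | some m' =>
    have h1 : m' ∈ m :: rest := (hm m').mp (PySem.List.min?_mem hmin)
    have h2 : m' ≤ m := PySem.List.min?_isMin hmin m hmf
    have h3 : m ≤ m' := by
      rcases List.mem_cons.mp h1 with rfl | h1
      · exact le_refl _
      · exact le_of_lt ((List.pairwise_cons.mp hp).1 m' h1)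
    rw [le_antisymm h2 h3]

lemma discard_inv (m : Int) (rest f : List Int) (hinv : InvHF (m :: rest) f) :
    InvHF rest (PySem.Set.discard f m) := by
  obtain ⟨hp, hn, hm⟩ := hinv
  refine ⟨List.Pairwise.of_cons hp, PySem.Set.nodup_discard f m hn, ?_⟩
  intro x
  rw [PySem.Set.mem_discard]
  constructor
  · rintro ⟨hx, hne⟩
    rcases List.mem_cons.mp ((hm x).mp hx) with rfl | hx
    · exact absurd rfl hne
    · exact hx
  · intro hx
    have hlt := (List.pairwise_cons.mp hp).1 x hx
    exact ⟨(hm x).mpr (List.mem_cons_of_mem _ hx), ne_of_gt hlt⟩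

lemma go_eq (A B C : Int) : ∀ (n : Nat) (h f res : List Int), InvHF h f →
    solveGoA A B C n h res = solveGoB A B C n f res := by
  intro n
  induction n with
  | zero => intro h f res _; rfl
  | succ n ih =>
    intro h f res hinv
    cases h with
    | nil =>
      have hf : f = [] := List.eq_nil_iff_forall_not_mem.mpr
        (fun x hx => by have := (hinv.2.2 x).mp hx; simp at this)
      simp [solveGoA, solveGoB, hf, PySem.List.min?]
    | cons m rest =>
      have hmin := min_of_inv m rest f hinv
      simp only [solveGoA, solveGoB, hmin]
      exact ih _ _ _ (fold_inv [m * A, m * B, m * C] rest (PySem.Set.discard f m)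
        (discard_inv m rest f hinv))

-- ===== VERDICT (by name: the statement is the Claim_ definition above) =====
theorem solve_spec : Claim_equal_solve := by
  intro A B C D _
  unfold Spec_solve solve solve_alt
  rw [PySem.Set.ofList_eq_foldl]
  exact go_eq A B C D.toNat _ _ [] (fold_inv [A, B, C] [] [] ⟨List.Pairwise.nil, List.nodup_nil, by simp⟩)
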